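-- pv_equiv track=rewrite | github.com/tewiSong/hyper-enz | util/data_pre_handle_utils.py | transe_single2id
-- ===== SOURCE A (Python) =====
-- def transe_single2id(datas, e2id, clist2edgeId, edge_id_start):
--     train_triples = []
--     single_train = []
--     edge_id = edge_id_start
--
--     for left, right,e in datas:
--         left = tuple(sorted(left))
--         right = tuple(sorted(right))
--
--         if left not in clist2edgeId:
--             clist2edgeId[left] = edge_id
--             edge_id += 1
--
--         if right not in clist2edgeId:
--             clist2edgeId[right] = edge_id
--             edge_id += 1
--
--         train_triples.append((clist2edgeId[left], e2id[e], clist2edgeId[right]))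
--
--         single_train.append((left,e))
--         single_train.append((right,e))
--     return train_triples, single_train, clist2edgeId, edge_id
-- ===== SOURCE B (Python) =====
-- def _assign(clist2edgeId, key, edge_id):
--     if key not in clist2edgeId:
--         clist2edgeId[key] = edge_id
--         edge_id += 1
--     return edge_id
--
--
-- def transe_single2id(datas, e2id, clist2edgeId, edge_id_start):
--     # Pass 1: assign edge ids in first-seen order (left before right).
--     edge_id = edge_id_start
--     for left, right, e in datas:
--         edge_id = _assign(clist2edgeId, tuple(sorted(left)), edge_id)
--         edge_id = _assign(clist2edgeId, tuple(sorted(right)), edge_id)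
--     # Pass 2: read the fully-built mapping to produce the outputs.
--     train_triples = []
--     single_train = []
--     for left, right, e in datas:
--         l = tuple(sorted(left))
--         r = tuple(sorted(right))
--         train_triples.append((clist2edgeId[l], e2id[e], clist2edgeId[r]))
--         single_train.append((l, e))
--         single_train.append((r, e))
--     return train_triples, single_train, clist2edgeId, edge_id
-- ===== Notes on version B (the rewrite author's own statement) =====
-- stated objective: alternative
-- what changed: Replaces A's single interleaved loop by two passes: the first assigns all edge ids (left before right, in iteration order), the second reads the fully-built mapping to emit the triples and singles; correctness relies on ids never changing once assigned.
-- outside the precondition, e.g. on transe_single2id([([1], [2], 'missing')], {}, {}, 0): A raises KeyError, B raises KeyError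
import Mathlib
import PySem

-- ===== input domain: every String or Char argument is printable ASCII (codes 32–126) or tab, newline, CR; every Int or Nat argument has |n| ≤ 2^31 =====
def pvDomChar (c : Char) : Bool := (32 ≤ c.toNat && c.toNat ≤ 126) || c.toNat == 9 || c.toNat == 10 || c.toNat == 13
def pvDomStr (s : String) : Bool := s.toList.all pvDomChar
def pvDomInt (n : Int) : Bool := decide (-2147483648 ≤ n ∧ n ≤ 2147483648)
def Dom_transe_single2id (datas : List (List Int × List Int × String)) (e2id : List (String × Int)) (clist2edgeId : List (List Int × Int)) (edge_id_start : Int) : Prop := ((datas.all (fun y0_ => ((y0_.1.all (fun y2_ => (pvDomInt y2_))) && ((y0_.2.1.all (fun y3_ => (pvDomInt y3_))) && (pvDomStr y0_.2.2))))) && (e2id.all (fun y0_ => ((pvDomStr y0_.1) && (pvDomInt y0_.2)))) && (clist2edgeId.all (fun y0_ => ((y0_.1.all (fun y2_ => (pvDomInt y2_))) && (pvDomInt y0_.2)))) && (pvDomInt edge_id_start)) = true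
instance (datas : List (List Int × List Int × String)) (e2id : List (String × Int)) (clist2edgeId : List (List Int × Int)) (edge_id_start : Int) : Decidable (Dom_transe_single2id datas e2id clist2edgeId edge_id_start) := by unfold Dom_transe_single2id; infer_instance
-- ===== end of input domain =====

-- B replaces A's single interleaved loop by two passes (assign all edge ids first, then read
-- the fully-built mapping); alternative decomposition, same cost. Like A, B mutates the passed
-- clist2edgeId dict in place (the same final state); the equivalence proved is about the return value.


-- tuple(sorted(l)) — shared by both Pythons
def tsKey (l : List Int) : List Int := PySem.List.sorted l (fun v => v) false

-- ===== PORT A =====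
-- A's loop body, one state tuple (train_triples, single_train, clist2edgeId, edge_id)
def tsStepA (e2 : PySem.Dict String Int)
    (st : List (Int × Int × Int) × List (List Int × String) × PySem.Dict (List Int) Int × Int)
    (x : List Int × List Int × String) :
    List (Int × Int × Int) × List (List Int × String) × PySem.Dict (List Int) Int × Int :=
  let L := tsKey x.1
  let R := tsKey x.2.1
  let dk1 := if st.2.2.1.contains L then (st.2.2.1, st.2.2.2) else (st.2.2.1.insert L st.2.2.2, st.2.2.2 + 1)
  let dk2 := if dk1.1.contains R then dk1 else (dk1.1.insert R dk1.2, dk1.2 + 1)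
  (st.1 ++ [(dk2.1.getD L 0, e2.getD x.2.2 0, dk2.1.getD R 0)],
   st.2.1 ++ [(L, x.2.2), (R, x.2.2)], dk2.1, dk2.2)

-- e2id[e] is ported as getD _ 0: Python raises KeyError where the key is missing; Pre_ excludes those inputs
def transe_single2id (datas : List (List Int × List Int × String)) (e2id : List (String × Int)) (clist2edgeId : List (List Int × Int)) (edge_id_start : Int) : (List (Int × Int × Int)) × (List (List Int × String)) × (List (List Int × Int)) × Int :=
  let st := datas.foldl (tsStepA (PySem.Dict.ofList e2id)) ([], [], PySem.Dict.ofList clist2edgeId, edge_id_start)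
  (st.1, st.2.1, st.2.2.1.items, st.2.2.2)

-- ===== PORT B =====
-- helper _assign of Source B
def tsAssignB (dk : PySem.Dict (List Int) Int × Int) (k : List Int) : PySem.Dict (List Int) Int × Int :=
  if dk.1.contains k then dk else (dk.1.insert k dk.2, dk.2 + 1)

-- pass 1: assign all edge ids, left before right, in iteration order
def tsPass1 (datas : List (List Int × List Int × String)) (dk : PySem.Dict (List Int) Int × Int) :
    PySem.Dict (List Int) Int × Int :=
  datas.foldl (fun dk x => tsAssignB (tsAssignB dk (tsKey x.1)) (tsKey x.2.1)) dk

def transe_single2id_alt (datas : List (List Int × List Int × String)) (e2id : List (String × Int)) (clist2edgeId : List (List Int × Int)) (edge_id_start : Int) : (List (Int × Int × Int)) × (List (List Int × String)) × (List (List Int × Int)) × Int :=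
  let e2 := PySem.Dict.ofList e2id
  let dk := tsPass1 datas (PySem.Dict.ofList clist2edgeId, edge_id_start)
  -- pass 2: read the fully-built mapping
  let ts := datas.foldl (fun (ts : List (Int × Int × Int) × List (List Int × String)) x =>
      (ts.1 ++ [(dk.1.getD (tsKey x.1) 0, e2.getD x.2.2 0, dk.1.getD (tsKey x.2.1) 0)],
       ts.2 ++ [(tsKey x.1, x.2.2), (tsKey x.2.1, x.2.2)])) ([], [])
  (ts.1, ts.2, dk.1.items, dk.2)

-- ===== PRECONDITION & SPEC =====
-- Pre_ excludes inputs where some relation string of datas is not a key of e2id: there Python A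
-- (and Python B) raise KeyError, so no value is claimed.
def Pre_transe_single2id (datas : List (List Int × List Int × String)) (e2id : List (String × Int)) (clist2edgeId : List (List Int × Int)) (edge_id_start : Int) : Prop :=
  (datas.all (fun x => e2id.any (fun p => p.1 == x.2.2))) = true
instance (datas : List (List Int × List Int × String)) (e2id : List (String × Int)) (clist2edgeId : List (List Int × Int)) (edge_id_start : Int) : Decidable (Pre_transe_single2id datas e2id clist2edgeId edge_id_start) := by unfold Pre_transe_single2id; infer_instance
def pvWitness_transe_single2id : (List (List Int × List Int × String)) × (List (String × Int)) × (List (List Int × Int)) × Int :=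
  ([([2, 1], [3], "r"), ([3], [1, 2], "s")], [("r", 5), ("s", 6)], [([4], 0)], 1)
def Spec_transe_single2id (datas : List (List Int × List Int × String)) (e2id : List (String × Int)) (clist2edgeId : List (List Int × Int)) (edge_id_start : Int) (out : (List (Int × Int × Int)) × (List (List Int × String)) × (List (List Int × Int)) × Int) : Prop := out = transe_single2id_alt datas e2id clist2edgeId edge_id_start
instance (datas : List (List Int × List Int × String)) (e2id : List (String × Int)) (clist2edgeId : List (List Int × Int)) (edge_id_start : Int) (out : (List (Int × Int × Int)) × (List (List Int × String)) × (List (List Int × Int)) × Int) : Decidable (Spec_transe_single2id datas e2id clist2edgeId edge_id_start out) := by unfold Spec_transe_single2id; infer_instance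

-- ===== CLAIM (what is proved, stated in full; the proofs are below) =====
def Claim_equal_transe_single2id : Prop := ∀ (datas : List (List Int × List Int × String)) (e2id : List (String × Int)) (clist2edgeId : List (List Int × Int)) (edge_id_start : Int), Dom_transe_single2id datas e2id clist2edgeId edge_id_start → Pre_transe_single2id datas e2id clist2edgeId edge_id_start → Spec_transe_single2id datas e2id clist2edgeId edge_id_start (transe_single2id datas e2id clist2edgeId edge_id_start)

-- ===== LEMMAS AND PROOFS =====

-- _assign never disturbs an existing binding
lemma tsAssignB_mono (dk : PySem.Dict (List Int) Int × Int) (k' k : List Int) (v : Int)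
    (h : dk.1.get? k = some v) : (tsAssignB dk k').1.get? k = some v := by
  unfold tsAssignB
  split
  · exact h
  · rename_i hc
    rw [PySem.Dict.get?_insert]
    split
    · rename_i hk; subst hk
      rw [PySem.Dict.contains_eq_isSome_get?, h] at hc
      simp at hc
    · exact h

lemma tsAssignB_self (dk : PySem.Dict (List Int) Int × Int) (k : List Int) :
    ∃ v, (tsAssignB dk k).1.get? k = some v := by
  unfold tsAssignB
  split
  · rename_i hc
    rw [PySem.Dict.contains_eq_isSome_get?] at hc
    cases h : dk.1.get? k with
    | none => rw [h] at hc; simp at hc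
    | some v => exact ⟨v, rfl⟩
  · exact ⟨dk.2, PySem.Dict.get?_insert_self _ _ _⟩

-- pass 1 never disturbs an existing binding
lemma tsPass1_mono (datas : List (List Int × List Int × String)) :
    ∀ (dk : PySem.Dict (List Int) Int × Int) (k : List Int) (v : Int),
    dk.1.get? k = some v → (tsPass1 datas dk).1.get? k = some v := by
  induction datas with
  | nil => intro dk k v h; exact h
  | cons x rest ih =>
    intro dk k v h
    exact ih _ k v (tsAssignB_mono _ _ _ _ (tsAssignB_mono _ _ _ _ h))

lemma tsPass1_getD (datas : List (List Int × List Int × String))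
    (dk : PySem.Dict (List Int) Int × Int) (k : List Int) (v : Int)
    (h : dk.1.get? k = some v) :
    (tsPass1 datas dk).1.getD k 0 = dk.1.getD k 0 := by
  rw [PySem.Dict.getD_eq_get?_getD, PySem.Dict.getD_eq_get?_getD, h, tsPass1_mono datas dk k v h]

-- A's one-pass loop computes, from any state, B's two-pass result
lemma ts_main (e2 : PySem.Dict String Int) (datas : List (List Int × List Int × String)) :
    ∀ (d : PySem.Dict (List Int) Int) (id : Int)
      (t : List (Int × Int × Int)) (s : List (List Int × String)),
    datas.foldl (tsStepA e2) (t, s, d, id) =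
      (datas.foldl (fun acc x => acc ++ [((tsPass1 datas (d, id)).1.getD (tsKey x.1) 0,
                                          e2.getD x.2.2 0,
                                          (tsPass1 datas (d, id)).1.getD (tsKey x.2.1) 0)]) t,
       datas.foldl (fun acc x => acc ++ [(tsKey x.1, x.2.2), (tsKey x.2.1, x.2.2)]) s,
       (tsPass1 datas (d, id)).1, (tsPass1 datas (d, id)).2) := by
  induction datas with
  | nil => intro d id t s; rfl
  | cons x rest ih =>
    intro d id t s
    have hpass1 : tsPass1 (x :: rest) (d, id)
        = tsPass1 rest (tsAssignB (tsAssignB (d, id) (tsKey x.1)) (tsKey x.2.1)) := rfl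
    have hstep : tsStepA e2 (t, s, d, id) x =
        (t ++ [((tsAssignB (tsAssignB (d, id) (tsKey x.1)) (tsKey x.2.1)).1.getD (tsKey x.1) 0,
                e2.getD x.2.2 0,
                (tsAssignB (tsAssignB (d, id) (tsKey x.1)) (tsKey x.2.1)).1.getD (tsKey x.2.1) 0)],
         s ++ [(tsKey x.1, x.2.2), (tsKey x.2.1, x.2.2)],
         (tsAssignB (tsAssignB (d, id) (tsKey x.1)) (tsKey x.2.1)).1,
         (tsAssignB (tsAssignB (d, id) (tsKey x.1)) (tsKey x.2.1)).2) := by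
      simp only [tsStepA, tsAssignB]
    -- the two lookups of the new triple survive pass 1 over the rest
    set dk2 := tsAssignB (tsAssignB (d, id) (tsKey x.1)) (tsKey x.2.1) with hdk2
    obtain ⟨vL, hvL⟩ : ∃ v, dk2.1.get? (tsKey x.1) = some v := by
      obtain ⟨v, hv⟩ := tsAssignB_self (d, id) (tsKey x.1)
      exact ⟨v, tsAssignB_mono _ _ _ _ hv⟩
    obtain ⟨vR, hvR⟩ := tsAssignB_self (tsAssignB (d, id) (tsKey x.1)) (tsKey x.2.1)
    simp only [List.foldl_cons, hstep, ih dk2.1 dk2.2, hpass1]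
    have hL := tsPass1_getD rest dk2 (tsKey x.1) vL hvL
    have hR := tsPass1_getD rest dk2 (tsKey x.2.1) vR hvR
    rw [hL, hR]

-- B's pass-2 pair fold splits into two independent folds
lemma ts_pair_fold {α β γ : Type} (f : List α → β → List α) (g : List γ → β → List γ)
    (xs : List β) : ∀ (t : List α) (s : List γ),
    xs.foldl (fun ts x => (f ts.1 x, g ts.2 x)) (t, s) = (xs.foldl f t, xs.foldl g s) := by
  induction xs with
  | nil => intro t s; rfl
  | cons x rest ih => intro t s; simp only [List.foldl_cons]; exact ih (f t x) (g s x)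

-- ===== VERDICT (by name: the statement is the Claim_ definition above) =====
theorem transe_single2id_spec : Claim_equal_transe_single2id := by
  intro datas e2id clist2edgeId edge_id_start _ _
  unfold Spec_transe_single2id transe_single2id transe_single2id_alt
  simp only [ts_main (PySem.Dict.ofList e2id) datas (PySem.Dict.ofList clist2edgeId) edge_id_start]
  rw [ts_pair_fold
      (fun acc x => acc ++ [((tsPass1 datas (PySem.Dict.ofList clist2edgeId, edge_id_start)).1.getD (tsKey x.1) 0,
          (PySem.Dict.ofList e2id).getD x.2.2 0,
          (tsPass1 datas (PySem.Dict.ofList clist2edgeId, edge_id_start)).1.getD (tsKey x.2.1) 0)])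
      (fun acc x => acc ++ [(tsKey x.1, x.2.2), (tsKey x.2.1, x.2.2)]) datas [] []]
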